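-- pv_equiv track=rewrite | github.com/luka1sys/GOA-Homeworks-Secondary-Device | day 34/homework/homework1.py | Understanding_the_number_of_characters
-- ===== SOURCE A (Python) =====
-- def Understanding_the_number_of_characters(string1):
--
--     count_list = []
--     char_count = {}
--
--     for char in string1:
--         if char in char_count:
--             char_count[char] += 1
--         else:
--             char_count[char] = 1
--
--
--     for count in char_count.values():
--         if count not in count_list:
--             count_list.append(count)
--
--     return sorted(count_list)
-- ===== SOURCE B (Python) =====
-- def Understanding_the_number_of_characters(string1):
--     counts = set()
--     chars = sorted(string1)
--     while chars:
--         c = chars[0]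
--         run = 1
--         while run < len(chars) and chars[run] == c:
--             run += 1
--         counts.add(run)
--         chars = chars[run:]
--     return sorted(counts)
-- ===== Notes on version B (the rewrite author's own statement) =====
-- stated objective: alternative
-- what changed: B builds the distinct frequency counts by sorting the characters and scanning consecutive equal-character run lengths into a set, instead of tallying into a dict and then deduplicating its values with a membership-scan list.
import Mathlib
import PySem

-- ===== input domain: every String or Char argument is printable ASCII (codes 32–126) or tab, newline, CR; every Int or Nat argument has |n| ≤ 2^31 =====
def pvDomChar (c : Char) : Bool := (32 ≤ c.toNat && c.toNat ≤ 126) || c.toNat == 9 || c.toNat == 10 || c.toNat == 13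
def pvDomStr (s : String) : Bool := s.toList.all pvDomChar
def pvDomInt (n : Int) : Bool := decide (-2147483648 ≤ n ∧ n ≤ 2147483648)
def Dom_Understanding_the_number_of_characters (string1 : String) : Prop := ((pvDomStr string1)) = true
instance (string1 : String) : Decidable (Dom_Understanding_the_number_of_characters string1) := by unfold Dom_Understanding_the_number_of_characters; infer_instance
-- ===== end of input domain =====

-- B replaces A's dict tally followed by a values-dedup membership scan with a sort-then-run-length scan collected into a set (alternative algorithm, same result).

-- ===== PORT A =====
def Understanding_the_number_of_characters (string1 : String) : List Int :=
  let count_list : List Int := []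
  let char_count : PySem.Dict Char Int := PySem.Dict.empty
  -- for char in string1: if char in char_count: char_count[char] += 1 else: char_count[char] = 1
  let char_count := string1.toList.foldl (fun d ch =>
      if d.contains ch then d.insert ch (d.getD ch 0 + 1) else d.insert ch 1) char_count
  -- for count in char_count.values(): if count not in count_list: count_list.append(count)
  let count_list := char_count.values.foldl (fun acc c =>
      if acc.contains c then acc else acc ++ [c]) count_list
  PySem.List.sorted count_list (fun x => x) false

-- ===== PORT B =====
-- Source B's outer while loop: consume one run of equal leading characters per step, add its length to the set
def pvRuns (chars : List Char) (counts : PySem.Set Int) : PySem.Set Int :=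
  match chars with
  | [] => counts
  | c :: rest =>
      -- inner while loop: run = length of the leading block of chars equal to c = chars[0]
      let run : Int := 1 + ((rest.takeWhile (fun x => x == c)).length : Int)
      -- chars = chars[run:]
      pvRuns (rest.dropWhile (fun x => x == c)) (counts.add run)
termination_by chars.length
decreasing_by
  exact Nat.lt_succ_of_le (List.length_dropWhile_le _ _)

def Understanding_the_number_of_characters_alt (string1 : String) : List Int :=
  PySem.List.sorted
    (pvRuns (PySem.List.sorted string1.toList (fun x => x) false) PySem.Set.empty)
    (fun x => x) false

-- ===== PRECONDITION & SPEC =====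
def Spec_Understanding_the_number_of_characters (string1 : String) (out : List Int) : Prop := out = Understanding_the_number_of_characters_alt string1
instance (string1 : String) (out : List Int) : Decidable (Spec_Understanding_the_number_of_characters string1 out) := by unfold Spec_Understanding_the_number_of_characters; infer_instance

-- ===== CLAIM (what is proved, stated in full; the proofs are below) =====
def Claim_equal_Understanding_the_number_of_characters : Prop := ∀ (string1 : String), Dom_Understanding_the_number_of_characters string1 → Spec_Understanding_the_number_of_characters string1 (Understanding_the_number_of_characters string1)

-- ===== LEMMAS AND PROOFS =====

-- A's result in closed form: sorted set of count-values, one count per distinct character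
theorem A_closed (string1 : String) :
    Understanding_the_number_of_characters string1 =
      PySem.List.sorted
        (PySem.Set.ofList ((PySem.Set.ofList string1.toList).map
          (fun c => (string1.toList.count c : Int))))
        (fun x => x) false := by
  unfold Understanding_the_number_of_characters
  dsimp only
  have hd : string1.toList.foldl (fun (d : PySem.Dict Char Int) ch =>
      if d.contains ch then d.insert ch (d.getD ch 0 + 1) else d.insert ch 1) PySem.Dict.empty
      = PySem.Dict.counter string1.toList := by
    rw [← PySem.Dict.foldl_insert_getD_add_one_eq_counter]
    apply PySem.List.foldl_congr_mem
    intro d ch _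
    cases h : d.contains ch with
    | true => simp
    | false =>
      rw [PySem.Dict.contains_eq_isSome_get?] at h
      have h2 : d.get? ch = none := by simpa using h
      simp [PySem.Dict.getD, h2]
  rw [hd]
  have hv : (PySem.Dict.counter string1.toList).values
      = (PySem.Set.ofList string1.toList).map (fun c => (string1.toList.count c : Int)) := by
    show (PySem.Dict.counter string1.toList).items.map (·.2) = _
    rw [PySem.Dict.items_counter]
    simp [List.map_map, Function.comp]
  rw [hv]
  congr 1

-- on a sorted list, the suffix left after dropping the leading run is strictly above the run character
theorem drop_gt (c : Char) (rest : List Char) (hl : (c :: rest).Pairwise (· ≤ ·)) :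
    ∀ x ∈ rest.dropWhile (fun y => y == c), c < x := by
  rw [List.pairwise_cons] at hl
  obtain ⟨hle, hp⟩ := hl
  cases hd : rest.dropWhile (fun y => y == c) with
  | nil => simp
  | cons h tl =>
    have hh : ¬ (h == c) = true := by
      have := List.head?_dropWhile_not (fun y => y == c) rest
      rw [hd] at this; simpa using this
    have hhc : c < h := by
      have : c ≤ h := hle h (by
        have := (List.dropWhile_sublist (l := rest) (fun y => y == c)).subset
        exact this (hd ▸ List.mem_cons_self))
      rcases lt_or_eq_of_le this with h1 | h1
      · exact h1
      · exact absurd (by simp [← h1]) hh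
    intro x hx
    rcases List.mem_cons.mp hx with rfl | hx
    · exact hhc
    · have hpd : (rest.dropWhile (fun y => y == c)).Pairwise (· ≤ ·) :=
        hp.sublist (List.dropWhile_sublist _)
      rw [hd, List.pairwise_cons] at hpd
      exact lt_of_lt_of_le hhc (hpd.1 x hx)

-- membership in the run-length set: exactly the character counts of the (sorted) list
theorem mem_pvRuns (l : List Char) (s : PySem.Set Int) (hl : l.Pairwise (· ≤ ·)) (m : Int) :
    m ∈ pvRuns l s ↔ m ∈ s ∨ ∃ c ∈ l, (l.count c : Int) = m := by
  match l with
  | [] => simp [pvRuns]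
  | c :: rest =>
    set t := rest.takeWhile (fun x => x == c) with ht
    set d := rest.dropWhile (fun x => x == c) with hdd
    have hrest : t ++ d = rest := List.takeWhile_append_dropWhile
    have htc : ∀ x ∈ t, x = c := by
      intro x hx
      have := List.mem_takeWhile_imp hx
      simpa using this
    have hdgt : ∀ x ∈ d, c < x := drop_gt c rest hl
    have hdnc : c ∉ d := fun h => lt_irrefl c (hdgt c h)
    have hpd : d.Pairwise (· ≤ ·) :=
      (List.pairwise_cons.mp hl).2.sublist (List.dropWhile_sublist _)
    have hcount_c : (c :: rest).count c = t.length + 1 := by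
      rw [List.count_cons_self, ← hrest, List.count_append]
      rw [List.count_eq_length.mpr (fun b hb => (htc b hb).symm),
        List.count_eq_zero.mpr hdnc]
    have hcount_d : ∀ c' ∈ d, (c :: rest).count c' = d.count c' := by
      intro c' hc'
      have hne : c' ≠ c := fun h => lt_irrefl c (h ▸ hdgt c' hc')
      rw [← hrest]
      simp [List.count_append, Ne.symm hne,
        List.count_eq_zero.mpr (fun h => hne (htc c' h))]
    have IH := mem_pvRuns d (s.add (1 + (t.length : Int))) hpd m
    rw [pvRuns]
    simp only [← ht, ← hdd] at *
    rw [IH, PySem.Set.mem_add]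
    constructor
    · rintro (⟨hs | rfl⟩ | ⟨c', hc', hc'm⟩)
      · exact Or.inl hs
      · exact Or.inr ⟨c, List.mem_cons_self, by rw [hcount_c]; push_cast; ring⟩
      · refine Or.inr ⟨c', ?_, by rw [hcount_d c' hc']; exact hc'm⟩
        exact List.mem_cons_of_mem _ (hrest ▸ List.mem_append_right t hc')
    · rintro (hs | ⟨c₀, hc₀, hc₀m⟩)
      · exact Or.inl (Or.inl hs)
      · rcases List.mem_cons.mp hc₀ with rfl | hc₀
        · exact Or.inl (Or.inr (by rw [hcount_c] at hc₀m; push_cast at hc₀m ⊢; omega))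
        · rw [← hrest] at hc₀
          rcases List.mem_append.mp hc₀ with hc₀ | hc₀
          · have : c₀ = c := htc c₀ hc₀
            subst this
            exact Or.inl (Or.inr (by rw [hcount_c] at hc₀m; push_cast at hc₀m ⊢; omega))
          · exact Or.inr ⟨c₀, hc₀, by rw [← hcount_d c₀ hc₀]; exact hc₀m⟩
termination_by l.length
decreasing_by
  exact Nat.lt_succ_of_le (List.length_dropWhile_le _ _)

theorem nodup_pvRuns (l : List Char) (s : PySem.Set Int) (hs : s.Nodup) :
    (pvRuns l s).Nodup := by
  match l with
  | [] => simpa [pvRuns] using hs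
  | c :: rest =>
    rw [pvRuns]
    exact nodup_pvRuns _ _ (PySem.Set.nodup_add _ _ hs)
termination_by l.length
decreasing_by
  exact Nat.lt_succ_of_le (List.length_dropWhile_le _ _)

-- ===== VERDICT (by name: the statement is the Claim_ definition above) =====
theorem Understanding_the_number_of_characters_spec : Claim_equal_Understanding_the_number_of_characters := by
  intro string1 _
  unfold Spec_Understanding_the_number_of_characters Understanding_the_number_of_characters_alt
  rw [A_closed, PySem.List.sorted_id_eq_sorted_id_iff_perm]
  have hP : (PySem.List.sorted string1.toList (fun x => x) false).Perm string1.toList :=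
    PySem.List.sorted_perm _ _ _
  rw [List.perm_ext_iff_of_nodup (PySem.Set.nodup_ofList _)
    (nodup_pvRuns _ PySem.Set.empty (by simp [PySem.Set.empty]))]
  intro a
  rw [PySem.Set.mem_ofList,
    mem_pvRuns _ _ (PySem.List.sorted_pairwise string1.toList (fun x => x)) a]
  simp only [List.mem_map, PySem.Set.mem_ofList, PySem.Set.empty, List.not_mem_nil, false_or]
  constructor
  · rintro ⟨c, hc, rfl⟩
    exact ⟨c, hP.mem_iff.mpr hc, by rw [hP.count_eq]⟩
  · rintro ⟨c, hc, rfl⟩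
    exact ⟨c, hP.mem_iff.mp hc, by rw [hP.count_eq]⟩
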